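-- pv_equiv track=rewrite | github.com/techbysj/algorithms-and-its-elements | sentence_analyzer.py | analyze_sentence
-- ===== SOURCE A (Python) =====
-- def analyze_sentence(sentence):
--     """
--     Analyzes a sentence ending with a period.
--
--     Args:
--         sentence (str): A string that ends with a period.
--
--     Returns:
--         tuple: (char_count, word_count, vowel_count)
--     """
--     char_count = 0
--     word_count = 0
--     vowel_count = 0
--     vowels = set('aeiouAEIOU')
--
--     # Read character by character
--     for ch in sentence:
--         char_count += 1
--         if ch in vowels:
--             vowel_count += 1
--         if ch == ' ':
--             word_count += 1
--         # Stop if we encounter a period (but we already counted it)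
--         if ch == '.':
--             break
--
--     # Number of words = spaces + 1 (assuming at least one word)
--     total_words = word_count + 1
--
--     return char_count, total_words, vowel_count
-- ===== SOURCE B (Python) =====
-- def analyze_sentence(sentence):
--     p = sentence.find('.')
--     segment = sentence if p < 0 else sentence[:p + 1]
--     vowels = set('aeiouAEIOU')
--     char_count = len(segment)
--     word_count = sum(1 for c in segment if c == ' ') + 1
--     vowel_count = sum(1 for c in segment if c in vowels)
--     return char_count, word_count, vowel_count
-- ===== Notes on version B (the rewrite author's own statement) =====
-- stated objective: idiomatic
-- what changed: Replaces A's single fused accumulator loop with break-at-period by locating the first period with str.find, slicing the inclusive prefix, and deriving the three counts from that slice (len and two generator sums).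
import Mathlib
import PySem

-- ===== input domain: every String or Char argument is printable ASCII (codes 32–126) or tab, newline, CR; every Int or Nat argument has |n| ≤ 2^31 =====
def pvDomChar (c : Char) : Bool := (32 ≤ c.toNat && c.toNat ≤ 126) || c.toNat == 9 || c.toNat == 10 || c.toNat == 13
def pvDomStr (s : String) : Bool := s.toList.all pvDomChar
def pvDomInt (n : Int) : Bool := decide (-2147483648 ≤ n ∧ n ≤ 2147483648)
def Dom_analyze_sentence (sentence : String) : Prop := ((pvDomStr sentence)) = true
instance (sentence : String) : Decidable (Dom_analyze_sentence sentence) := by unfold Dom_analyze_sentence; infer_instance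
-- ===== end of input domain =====

-- B replaces A's fused break-on-period accumulator loop by locating the first period
-- with find, slicing the prefix, and counting over that slice (objective: idiomatic).

-- the vowel set set('aeiouAEIOU'), used by both programs
def pvVowels : PySem.Set Char := PySem.Set.ofList "aeiouAEIOU".toList

-- ===== PORT A =====
-- the 'for ch in sentence' loop with its three accumulators and the break at '.'
def pvLoopA : List Char → Int → Int → Int → Int × Int × Int
  | [], cc, wc, vc => (cc, wc + 1, vc)
  | ch :: rest, cc, wc, vc =>
    let cc' := cc + 1
    let vc' := if PySem.Set.contains pvVowels ch then vc + 1 else vc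
    let wc' := if ch == ' ' then wc + 1 else wc
    if ch == '.' then (cc', wc' + 1, vc') else pvLoopA rest cc' wc' vc'

def analyze_sentence (sentence : String) : Int × Int × Int :=
  pvLoopA sentence.toList 0 0 0

-- ===== PORT B =====
def analyze_sentence_alt (sentence : String) : Int × Int × Int :=
  let p := PySem.Str.find sentence "."
  let segment : List Char :=
    if p < 0 then sentence.toList
    else PySem.List.slice sentence.toList none (some (p + 1))
  let char_count : Int := PySem.Chars.len segment
  let word_count : Int := (segment.countP (fun c => c == ' ') : Int) + 1
  let vowel_count : Int := (segment.countP (fun c => PySem.Set.contains pvVowels c) : Int)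
  (char_count, word_count, vowel_count)

-- ===== PRECONDITION & SPEC =====
def Spec_analyze_sentence (sentence : String) (out : Int × Int × Int) : Prop := out = analyze_sentence_alt sentence
instance (sentence : String) (out : Int × Int × Int) : Decidable (Spec_analyze_sentence sentence out) := by unfold Spec_analyze_sentence; infer_instance

-- ===== CLAIM (what is proved, stated in full; the proofs are below) =====
def Claim_equal_analyze_sentence : Prop := ∀ (sentence : String), Dom_analyze_sentence sentence → Spec_analyze_sentence sentence (analyze_sentence sentence)

-- ===== LEMMAS AND PROOFS =====

-- the prefix of l up to and including the first '.', or all of l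
def pvSeg : List Char → List Char
  | [] => []
  | c :: r => if c = '.' then [c] else c :: pvSeg r

theorem pvLoopA_eq (l : List Char) : ∀ cc wc vc, pvLoopA l cc wc vc =
    (cc + ((pvSeg l).length : Int),
     wc + ((pvSeg l).countP (fun c => c == ' ') : Int) + 1,
     vc + ((pvSeg l).countP (fun c => PySem.Set.contains pvVowels c) : Int)) := by
  induction l with
  | nil => intro cc wc vc; simp [pvLoopA, pvSeg]
  | cons c r ih =>
    intro cc wc vc
    by_cases hdot : c = '.'
    · subst hdot
      simp [pvLoopA, pvSeg, List.countP_cons]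
      decide
    · simp only [pvLoopA, pvSeg, beq_iff_eq, if_neg hdot]
      rw [ih]
      simp only [List.countP_cons, Prod.mk.injEq]
      refine ⟨by simp [List.length_cons]; ring, ?_, ?_⟩ <;> split <;> simp_all <;> push_cast <;> ring

theorem pvSeg_of_not_mem (l : List Char) (h : '.' ∉ l) : pvSeg l = l := by
  induction l with
  | nil => rfl
  | cons c r ih =>
    simp only [List.mem_cons, not_or] at h
    simp [pvSeg, Ne.symm h.1, ih h.2]

theorem pvSeg_take (l : List Char) : ∀ (p : Nat), l[p]? = some '.' →
    (∀ i < p, l[i]? ≠ some '.') → pvSeg l = l.take (p + 1) := by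
  induction l with
  | nil => intro p hp _; simp at hp
  | cons c r ih =>
    intro p hp hmin
    cases p with
    | zero => simp at hp; simp [pvSeg, hp, List.take]
    | succ q =>
      have hc : c ≠ '.' := by
        intro hc; exact hmin 0 (Nat.succ_pos q) (by simp [hc])
      simp only [List.getElem?_cons_succ] at hp
      have := ih q hp (fun i hi => by
        have := hmin (i + 1) (by omega); simpa using this)
      simp [pvSeg, hc, this, List.take]

theorem pvSingleton_infix_iff (c : Char) (l : List Char) : [c] <:+: l ↔ c ∈ l := by
  constructor
  · intro h; exact h.mem (by simp)
  · intro h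
    obtain ⟨s, t, rfl⟩ := List.append_of_mem h
    exact ⟨s, t, by simp⟩

theorem pvSingleton_prefix_drop (c : Char) (l : List Char) (j : Nat) :
    [c] <+: l.drop j ↔ l[j]? = some c := by
  constructor
  · rintro ⟨t, ht⟩
    have : (l.drop j)[0]? = some c := by rw [← ht]; simp
    simpa [List.getElem?_drop] using this
  · intro h
    have : (l.drop j)[0]? = some c := by simpa [List.getElem?_drop] using h
    cases hd : l.drop j with
    | nil => simp [hd] at this
    | cons x xs => simp [hd] at this; exact ⟨xs, by simp [this]⟩

-- ===== VERDICT (by name: the statement is the Claim_ definition above) =====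
theorem analyze_sentence_spec : Claim_equal_analyze_sentence := by
  intro s _
  unfold Spec_analyze_sentence analyze_sentence analyze_sentence_alt
  set l := s.toList with hl
  have hfind : PySem.Str.find s "." = PySem.Chars.find l ['.'] := by
    rw [hl]; simp [PySem.Str.find_eq]
  rw [hfind]
  by_cases hmem : '.' ∈ l
  · -- find succeeds
    have hnn : 0 ≤ PySem.Chars.find l ['.'] := by
      rw [PySem.Chars.find_nonneg_iff, pvSingleton_infix_iff]; exact hmem
    obtain ⟨hpre, hminl⟩ := PySem.Chars.find_spec (s := l) (sub := ['.']) hnn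
    set p := (PySem.Chars.find l ['.']).toNat with hp
    have hget : l[p]? = some '.' := (pvSingleton_prefix_drop _ _ _).1 hpre
    have hmin : ∀ i < p, l[i]? ≠ some '.' := fun i hi hc =>
      hminl i hi ((pvSingleton_prefix_drop _ _ _).2 hc)
    have hseg : pvSeg l = l.take (p + 1) := pvSeg_take l p hget hmin
    have hcast : PySem.Chars.find l ['.'] = (p : Int) := by omega
    rw [pvLoopA_eq]
    simp only [hcast]
    have hlt : ¬ ((p : Int) < 0) := by omega
    have : ((p : Int) + 1) = ((p + 1 : Nat) : Int) := by push_cast; ring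
    simp only [if_neg hlt, this, PySem.List.slice_to_natCast, ← hseg,
      PySem.Chars.len_eq]
    simp
  · -- find = -1
    have hneg : PySem.Chars.find l ['.'] = -1 := by
      rw [PySem.Chars.find_eq_neg_one_iff, pvSingleton_infix_iff]; exact hmem
    rw [pvLoopA_eq, hneg]
    simp [pvSeg_of_not_mem l hmem, PySem.Chars.len_eq]
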